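-- pv_equiv track=rewrite | github.com/Noxy3301/ordo | ansible/py/plot_cpu.py | cpu_summary
-- ===== SOURCE A (Python) =====
-- def cpu_summary(data, hosts):
--     counts = {}
--     missing = 0
--     for host in hosts:
--         cpu = data[host].get("cpu_count")
--         if cpu is not None:
--             counts[cpu] = counts.get(cpu, 0) + 1
--         else:
--             missing += 1
--     parts = [f"{cpu}CPU x{counts[cpu]}" for cpu in sorted(counts)]
--     if missing:
--         parts.append(f"unknown x{missing}")
--     return ", ".join(parts)
-- ===== SOURCE B (Python) =====
-- def cpu_summary(data, hosts):
--     present = []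
--     missing = 0
--     for host in hosts:
--         cpu = data[host].get("cpu_count")
--         if cpu is None:
--             missing += 1
--         else:
--             present.append(cpu)
--     present.sort()
--     parts = []
--     i = 0
--     n = len(present)
--     while i < n:
--         j = i
--         while j < n and present[j] == present[i]:
--             j += 1
--         parts.append(f"{present[i]}CPU x{j - i}")
--         i = j
--     if missing:
--         parts.append(f"unknown x{missing}")
--     return ", ".join(parts)
-- ===== Notes on version B (the rewrite author's own statement) =====
-- stated objective: alternative
-- what changed: B replaces A's hash-map counting plus sorted-keys indexing by collecting the present cpu values into a list, sorting it once, and emitting one part per consecutive run with two index pointers; the counts dict disappears entirely.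
-- outside the precondition, e.g. on cpu_summary({}, ['a']): A raises KeyError, B raises KeyError
import Mathlib
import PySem

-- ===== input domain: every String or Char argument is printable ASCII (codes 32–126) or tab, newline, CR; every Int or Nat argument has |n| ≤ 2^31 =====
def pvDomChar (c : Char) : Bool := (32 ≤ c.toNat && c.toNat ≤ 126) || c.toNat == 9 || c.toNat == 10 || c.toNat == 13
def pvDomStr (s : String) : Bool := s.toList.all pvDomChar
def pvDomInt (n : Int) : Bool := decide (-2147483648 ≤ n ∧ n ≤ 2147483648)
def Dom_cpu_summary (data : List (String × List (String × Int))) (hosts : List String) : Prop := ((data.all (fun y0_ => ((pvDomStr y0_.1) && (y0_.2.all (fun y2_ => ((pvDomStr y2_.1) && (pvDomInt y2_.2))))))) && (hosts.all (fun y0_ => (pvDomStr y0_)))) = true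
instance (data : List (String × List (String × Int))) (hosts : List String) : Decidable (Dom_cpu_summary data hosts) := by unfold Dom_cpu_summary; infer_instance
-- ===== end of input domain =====

-- B replaces A's hash-counting-then-sorted-keys by collecting the present cpu values,
-- sorting them once and emitting one part per consecutive run (same cost, different algorithm).

-- ===== PORT A =====
-- cpu = data[host].get("cpu_count")  (shared by both ports: the same Python line occurs in A and B)
def pvCpuOf (data : List (String × List (String × Int))) (host : String) : Option Int :=
  (PySem.Dict.mk ((PySem.Dict.mk data).getD host [])).get? "cpu_count"

def cpu_summary (data : List (String × List (String × Int))) (hosts : List String) : String :=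
  -- for host in hosts: build counts (dict) and missing (int) — a loop with two accumulators
  let st := hosts.foldl (fun (s : PySem.Dict Int Int × Int) host =>
      ((match pvCpuOf data host with
        | some cpu => s.1.insert cpu (s.1.getD cpu 0 + 1)
        | none => s.1),
       (match pvCpuOf data host with
        | some _ => s.2
        | none => s.2 + 1))) (PySem.Dict.empty, 0)
  let counts := st.1
  let missing := st.2
  let parts := (PySem.List.sorted counts.keys (fun x => x) false).map
      (fun cpu => PySem.Int.toStr cpu ++ "CPU x" ++ PySem.Int.toStr (counts.getD cpu 0))
  let parts := if missing ≠ 0 then parts ++ ["unknown x" ++ PySem.Int.toStr missing] else parts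
  PySem.Str.join ", " parts

-- ===== PORT B =====
-- the two nested 'while' index loops of Source B: scan the sorted list run by run
def pvRunScan : List Int → List String
  | [] => []
  | v :: rest =>
    (PySem.Int.toStr v ++ "CPU x" ++ PySem.Int.toStr (((rest.takeWhile (fun x => x == v)).length : Int) + 1))
      :: pvRunScan (rest.dropWhile (fun x => x == v))
termination_by l => l.length
decreasing_by exact Nat.lt_succ_of_le (List.length_dropWhile_le _ _)

def cpu_summary_alt (data : List (String × List (String × Int))) (hosts : List String) : String :=
  -- for host in hosts: build present (list) and missing (int)
  let st := hosts.foldl (fun (s : List Int × Int) host =>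
      ((match pvCpuOf data host with
        | some cpu => s.1 ++ [cpu]
        | none => s.1),
       (match pvCpuOf data host with
        | some _ => s.2
        | none => s.2 + 1))) ([], 0)
  let present := PySem.List.sorted st.1 (fun x => x) false   -- present.sort()
  let parts := pvRunScan present
  let parts := if st.2 ≠ 0 then parts ++ ["unknown x" ++ PySem.Int.toStr st.2] else parts
  PySem.Str.join ", " parts

-- ===== PRECONDITION & SPEC =====
-- Pre_ excludes exactly the inputs where Python A raises KeyError: a host that is not a key of data.
def Pre_cpu_summary (data : List (String × List (String × Int))) (hosts : List String) : Prop :=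
  (hosts.all (fun h => data.any (fun p => p.1 == h))) = true
instance (data : List (String × List (String × Int))) (hosts : List String) : Decidable (Pre_cpu_summary data hosts) := by unfold Pre_cpu_summary; infer_instance

def pvWitness_cpu_summary : (List (String × List (String × Int))) × List String :=
  ([("a", [("cpu_count", 2)]), ("b", [])], ["a", "b", "a"])

def Spec_cpu_summary (data : List (String × List (String × Int))) (hosts : List String) (out : String) : Prop := out = cpu_summary_alt data hosts
instance (data : List (String × List (String × Int))) (hosts : List String) (out : String) : Decidable (Spec_cpu_summary data hosts out) := by unfold Spec_cpu_summary; infer_instance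

-- ===== CLAIM (what is proved, stated in full; the proofs are below) =====
def Claim_equal_cpu_summary : Prop := ∀ (data : List (String × List (String × Int))) (hosts : List String), Dom_cpu_summary data hosts → Pre_cpu_summary data hosts → Spec_cpu_summary data hosts (cpu_summary data hosts)

-- ===== LEMMAS AND PROOFS =====

-- the two-accumulator host loop of each port, split into its two results
theorem foldA_split (f : String → Option Int) (l : List String) :
    ∀ (d : PySem.Dict Int Int) (m : Int),
      l.foldl (fun s h =>
          ((match f h with | some cpu => s.1.insert cpu (s.1.getD cpu 0 + 1) | none => s.1),
           (match f h with | some _ => s.2 | none => s.2 + 1))) (d, m)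
        = ((l.filterMap f).foldl (fun d x => d.insert x (d.getD x 0 + 1)) d,
           m + ((l.countP fun x => (f x).isNone : Nat) : Int)) := by
  induction l with
  | nil => intro d m; simp
  | cons x t ih =>
    intro d m
    cases h : f x with
    | some c => simp [h, ih]
    | none =>
      simp [h, ih]
      ring

theorem foldB_split (f : String → Option Int) (l : List String) :
    ∀ (p : List Int) (m : Int),
      l.foldl (fun s h =>
          ((match f h with | some cpu => s.1 ++ [cpu] | none => s.1),
           (match f h with | some _ => s.2 | none => s.2 + 1))) (p, m)
        = (p ++ l.filterMap f,
           m + ((l.countP fun x => (f x).isNone : Nat) : Int)) := by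
  induction l with
  | nil => intro p m; simp
  | cons x t ih =>
    intro p m
    cases h : f x with
    | some c => simp [h, ih]
    | none =>
      simp [h, ih]
      ring

theorem set_foldl_add_cons {v : Int} (xs : List Int) (h : ∀ x ∈ xs, x ≠ v) :
    ∀ s : List Int, xs.foldl PySem.Set.add (v :: s) = v :: xs.foldl PySem.Set.add s := by
  induction xs with
  | nil => intro s; rfl
  | cons x t ih =>
    intro s
    have hxv : x ≠ v := h x (by simp)
    have hc : PySem.Set.add (v :: s) x = v :: PySem.Set.add s x := by
      simp only [PySem.Set.add, PySem.Set.contains]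
      simp [hxv]
      split <;> rfl
    simp only [List.foldl_cons, hc]
    exact ih (fun y hy => h y (by simp [hy])) _
theorem set_foldl_add_absorb {v : Int} (xs : List Int) (h : ∀ x ∈ xs, x = v) :
    ∀ s : List Int, v ∈ s → xs.foldl PySem.Set.add s = s := by
  induction xs with
  | nil => intro s _; rfl
  | cons x t ih =>
    intro s hv
    have hx : x = v := h x (by simp)
    have : PySem.Set.add s x = s := by
      simp [PySem.Set.add, PySem.Set.contains, hx, hv]
    rw [List.foldl_cons, this]
    exact ih (fun y hy => h y (by simp [hy])) s hv

-- Set.ofList of a sorted list splits off the leading run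
theorem ofList_run_split (v : Int) (rest : List Int)
    (hne : v ∉ rest.dropWhile (fun x => x == v)) :
    PySem.Set.ofList (v :: rest) = v :: PySem.Set.ofList (rest.dropWhile (fun x => x == v)) := by
  have hsplit : rest = rest.takeWhile (fun x => x == v) ++ rest.dropWhile (fun x => x == v) :=
    (List.takeWhile_append_dropWhile).symm
  have hrun : ∀ x ∈ rest.takeWhile (fun x => x == v), x = v := by
    intro x hx
    have := List.mem_takeWhile_imp hx
    simpa using this
  rw [PySem.Set.ofList_eq_foldl, PySem.Set.ofList_eq_foldl]
  have h0 : PySem.Set.add ([] : List Int) v = [v] := rfl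
  conv_lhs => rw [hsplit]
  rw [List.foldl_cons, h0, List.foldl_append,
    set_foldl_add_absorb _ hrun [v] (by simp),
    set_foldl_add_cons _ (fun x hx => by rintro rfl; exact hne hx) []]

-- the core lemma: run-scanning a sorted list produces A's parts
theorem runScan_eq (s : List Int) (hs : s.Pairwise (· ≤ ·)) :
    pvRunScan s = (PySem.Set.ofList s).map
      (fun c => PySem.Int.toStr c ++ "CPU x" ++ PySem.Int.toStr ((s.count c : Int))) := by
  induction s using pvRunScan.induct with
  | case1 => simp [pvRunScan]
  | case2 v rest ih =>
    set run := rest.takeWhile (fun x => x == v) with hrundef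
    set rest' := rest.dropWhile (fun x => x == v) with hrestdef
    have hsplit : rest = run ++ rest' := (List.takeWhile_append_dropWhile).symm
    have hrun : ∀ x ∈ run, x = v := by
      intro x hx; have := List.mem_takeWhile_imp hx; simpa using this
    have hrest'_sub : rest'.Sublist rest := List.dropWhile_sublist _
    have hrest'_pw : rest'.Pairwise (· ≤ ·) := List.Pairwise.sublist hrest'_sub (List.Pairwise.of_cons hs)
    have hle : ∀ x ∈ rest, v ≤ x := fun x hx => (List.pairwise_cons.mp hs).1 x hx
    -- v does not occur in rest'
    have hne : v ∉ rest' := by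
      intro hv
      cases hr : rest' with
      | nil => rw [hr] at hv; simp at hv
      | cons h t =>
        have hh : ((h == v) : Bool) = false := by
          have h0 := List.head?_dropWhile_not (fun x => x == v) rest
          rw [← hrestdef, hr] at h0
          simpa using h0
        have hhv : h ≠ v := by simpa using hh
        have hvh : v ≤ h := hle h (hrest'_sub.subset (by rw [hr]; simp))
        rw [hr] at hv
        rcases List.mem_cons.mp hv with e | hv'
        · exact hhv e.symm
        · have : h ≤ v := by
            have := (List.pairwise_cons.mp (by rw [hr] at hrest'_pw; exact hrest'_pw)).1
            exact this v hv'
          exact hhv (le_antisymm this hvh)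
    have hcountv : ((v :: rest).count v : Int) = (run.length : Int) + 1 := by
      have h1 : rest.count v = run.length := by
        rw [hsplit, List.count_append, List.count_eq_zero.mpr hne,
          List.count_eq_length.mpr (fun x hx => (hrun x hx).symm)]
        omega
      rw [List.count_cons_self, h1]
      push_cast; ring
    have hcount' : ∀ c ∈ rest', (v :: rest).count c = rest'.count c := by
      intro c hc
      have hcv : c ≠ v := fun e => hne (e ▸ hc)
      rw [hsplit, List.count_cons, List.count_append]
      have : run.count c = 0 := List.count_eq_zero.mpr (fun h => hcv (hrun c h))
      simp [this, Ne.symm hcv]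
    rw [pvRunScan, ofList_run_split v rest hne, List.map_cons, ← hrestdef, ← hrundef]
    congr 1
    · rw [hcountv]
    · rw [ih hrest'_pw]
      refine List.map_congr_left ?_
      intro c hc
      rw [hcount' c ((PySem.Set.mem_ofList rest' c).mp hc)]

-- sorting the distinct elements = the distinct elements of the sorted list
theorem sorted_ofList_comm (l : List Int) :
    PySem.List.sorted (PySem.Set.ofList l) (fun x => x) false
      = PySem.Set.ofList (PySem.List.sorted l (fun x => x) false) := by
  have hnd1 : (PySem.List.sorted (PySem.Set.ofList l) (fun x => x) false).Nodup :=
    ((PySem.List.sorted_perm _ _ _).nodup_iff).mpr (PySem.Set.nodup_ofList l)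
  have hnd2 : (PySem.Set.ofList (PySem.List.sorted l (fun x => x) false)).Nodup :=
    PySem.Set.nodup_ofList _
  have hperm : (PySem.List.sorted (PySem.Set.ofList l) (fun x => x) false).Perm
      (PySem.Set.ofList (PySem.List.sorted l (fun x => x) false)) := by
    rw [List.perm_ext_iff_of_nodup hnd1 hnd2]
    intro a
    rw [PySem.Set.mem_ofList, (PySem.List.sorted_perm _ _ _).mem_iff,
      (PySem.List.sorted_perm _ _ _).mem_iff, PySem.Set.mem_ofList]
  -- ofList of a sorted list is a sublist of it, hence still sorted
  have hsub : ∀ xs : List Int, (PySem.Set.ofList xs).Sublist xs := by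
    intro xs
    rw [PySem.Set.ofList_eq_foldl]
    have : ∀ (xs acc ys : List Int), acc.Sublist ys →
        (xs.foldl PySem.Set.add acc).Sublist (ys ++ xs) := by
      intro xs
      induction xs with
      | nil => intro acc ys h; simpa using h
      | cons x t ih =>
        intro acc ys h
        have h2 : (PySem.Set.add acc x).Sublist (ys ++ [x]) := by
          by_cases hc : x ∈ acc
          · have ha : PySem.Set.add acc x = acc := by
              simp [PySem.Set.add, PySem.Set.contains, hc]
            rw [ha]; exact h.trans (List.sublist_append_left ys [x])
          · have ha : PySem.Set.add acc x = acc ++ [x] := by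
              simp [PySem.Set.add, PySem.Set.contains, hc]
            rw [ha]; exact h.append (List.Sublist.refl [x])
        have := ih (PySem.Set.add acc x) (ys ++ [x]) h2
        simpa using this
    simpa using this xs [] [] (List.Sublist.refl [])
  exact PySem.List.eq_of_perm_of_pairwise_le_of_injective (fun x => x)
    (fun a b h => h) hperm
    (PySem.List.sorted_pairwise _ _)
    (List.Pairwise.sublist (hsub _) (PySem.List.sorted_pairwise l (fun x => x)))

-- ===== VERDICT (by name: the statement is the Claim_ definition above) =====
theorem cpu_summary_spec : Claim_equal_cpu_summary := by
  intro data hosts _ _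
  show cpu_summary data hosts = cpu_summary_alt data hosts
  simp only [cpu_summary, cpu_summary_alt]
  rw [foldA_split (pvCpuOf data) hosts PySem.Dict.empty 0,
    foldB_split (pvCpuOf data) hosts [] 0]
  simp only [List.nil_append]
  rw [PySem.Dict.foldl_insert_getD_add_one_eq_counter]
  set cpus := hosts.filterMap (pvCpuOf data) with hcpus
  have hmap : (PySem.List.sorted (PySem.Dict.counter cpus).keys (fun x => x) false).map
      (fun cpu => PySem.Int.toStr cpu ++ "CPU x" ++ PySem.Int.toStr ((PySem.Dict.counter cpus).getD cpu 0))
      = pvRunScan (PySem.List.sorted cpus (fun x => x) false) := by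
    rw [PySem.Dict.keys_counter, sorted_ofList_comm,
      runScan_eq _ (by simpa using PySem.List.sorted_pairwise cpus (fun x => x))]
    refine List.map_congr_left ?_
    intro c _
    rw [PySem.Dict.getD_counter, ((PySem.List.sorted_perm cpus (fun x => x) false).count_eq c)]
  rw [hmap]
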